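-- pv_equiv track=rewrite | github.com/pypi-data/pypi-mirror-315 | packages/amira-amr/amira_amr-0.4.0-py3-none-any.whl/amira/path_finding_operations.py | filter_blocks
-- ===== SOURCE A (Python) =====
-- def is_sublist(long_list, sub_list):
--     """Check if list is a sublist of long_list."""
--     assert isinstance(long_list, list) and isinstance(sub_list, list)
--     len_sub = len(sub_list)
--     return any(sub_list == long_list[i : i + len_sub] for i in range(len(long_list) - len_sub + 1))
--
-- def filter_blocks(full_blocks):
--     filtered_blocks = {}
--     for p in sorted(list(full_blocks.keys()), key=len, reverse=True):
--         p_list = list(p)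
--         rv_p_list = list(reversed(p_list))
--         if not any(
--             is_sublist(list(f), p_list) or is_sublist(list(f), rv_p_list) for f in filtered_blocks
--         ):
--             filtered_blocks[p] = full_blocks[p]
--     return filtered_blocks
-- ===== SOURCE B (Python) =====
-- def filter_blocks(full_blocks):
--     # Index every contiguous sub-tuple of the kept keys in a hash set once,
--     # so each candidate is a pair of O(1)-expected membership tests instead of
--     # a scan over all kept keys with a quadratic substring search.
--     seen = set()
--     filtered_blocks = {}
--     for p in sorted(full_blocks, key=len, reverse=True):
--         if p not in seen and p[::-1] not in seen:
--             filtered_blocks[p] = full_blocks[p]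
--             n = len(p)
--             for i in range(n):
--                 for j in range(i + 1, n + 1):
--                     seen.add(p[i:j])
--             seen.add(())
--     return filtered_blocks
-- ===== Notes on version B (the rewrite author's own statement) =====
-- stated objective: faster
-- what changed: Instead of testing each candidate against every kept key with a naive quadratic substring scan, B maintains one hash set of all contiguous sub-tuples (and the empty tuple) of the kept keys, so each candidate needs only two set-membership tests.
import Mathlib
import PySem

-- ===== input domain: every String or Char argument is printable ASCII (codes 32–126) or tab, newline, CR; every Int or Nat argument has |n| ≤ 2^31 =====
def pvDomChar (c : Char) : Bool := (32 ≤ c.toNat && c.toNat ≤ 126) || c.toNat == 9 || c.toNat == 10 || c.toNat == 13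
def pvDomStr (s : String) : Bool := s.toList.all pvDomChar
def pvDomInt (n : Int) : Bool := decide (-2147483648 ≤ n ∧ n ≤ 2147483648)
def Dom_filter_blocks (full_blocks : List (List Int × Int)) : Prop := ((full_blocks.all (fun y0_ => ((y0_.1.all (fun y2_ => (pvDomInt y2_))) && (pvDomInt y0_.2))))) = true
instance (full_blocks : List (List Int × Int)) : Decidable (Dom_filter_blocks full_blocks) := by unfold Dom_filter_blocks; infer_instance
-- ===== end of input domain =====

-- B replaces A's per-candidate scan of all kept keys (each with a naive quadratic substring
-- test) by one hash set holding every contiguous sub-tuple of the kept keys, so a candidate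
-- is decided by two set-membership tests.

-- ===== PORT A =====
-- `any(sub_list == long_list[i : i + len_sub] for i in range(len(long_list) - len_sub + 1))`
def is_sublist (long_list sub_list : List Int) : Bool :=
  (PySem.List.pyRange 0 ((long_list.length : Int) - (sub_list.length : Int) + 1) 1).any
    (fun i => sub_list == PySem.List.slice long_list (some i) (some (i + (sub_list.length : Int))))

-- `p_list = list(p)` is the identity on the List Int key; `rv_p_list = list(reversed(p_list))`
-- is `p.reverse`; `for f in filtered_blocks` iterates the dict's keys in insertion order.
def filter_blocks (full_blocks : List (List Int × Int)) : List (List Int × Int) :=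
  let fb := PySem.Dict.mk full_blocks
  ((PySem.List.sorted fb.keys (fun p => p.length) true).foldl
    (fun (filtered : PySem.Dict (List Int) Int) p =>
      if filtered.keys.any (fun f => is_sublist f p || is_sublist f p.reverse) then
        filtered
      else
        filtered.insert p (fb.getD p 0))
    PySem.Dict.empty).items

-- ===== PORT B =====
-- state = (filtered_blocks, seen); `p[::-1]` is `p.reverse`; the two `range` loops add every
-- nonempty contiguous sub-tuple `p[i:j]` of a kept key, then `seen.add(())` adds the empty one.
def filter_blocks_alt (full_blocks : List (List Int × Int)) : List (List Int × Int) :=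
  let fb := PySem.Dict.mk full_blocks
  ((PySem.List.sorted fb.keys (fun p => p.length) true).foldl
    (fun (st : PySem.Dict (List Int) Int × PySem.Set (List Int)) p =>
      if !(PySem.Set.contains st.2 p) && !(PySem.Set.contains st.2 p.reverse) then
        ((st.1.insert p (fb.getD p 0)),
         PySem.Set.add
           ((PySem.List.pyRange 0 (p.length : Int) 1).foldl
             (fun s i =>
               (PySem.List.pyRange (i + 1) ((p.length : Int) + 1) 1).foldl
                 (fun s j => PySem.Set.add s (PySem.List.slice p (some i) (some j))) s)
             st.2)
           [])
      else st)
    (PySem.Dict.empty, PySem.Set.empty)).1.items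

-- ===== PRECONDITION & SPEC =====
def Spec_filter_blocks (full_blocks : List (List Int × Int)) (out : List (List Int × Int)) : Prop := out = filter_blocks_alt full_blocks
instance (full_blocks : List (List Int × Int)) (out : List (List Int × Int)) : Decidable (Spec_filter_blocks full_blocks out) := by unfold Spec_filter_blocks; infer_instance

-- ===== CLAIM (what is proved, stated in full; the proofs are below) =====
def Claim_equal_filter_blocks : Prop := ∀ (full_blocks : List (List Int × Int)), Dom_filter_blocks full_blocks → Spec_filter_blocks full_blocks (filter_blocks full_blocks)

-- ===== LEMMAS AND PROOFS =====

-- `y` occurs as a contiguous block inside `f`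
def occursIn (f y : List Int) : Prop :=
  ∃ k : Nat, k + y.length ≤ f.length ∧ y = (f.drop k).take y.length

theorem is_sublist_iff (f y : List Int) : is_sublist f y = true ↔ occursIn f y := by
  unfold is_sublist occursIn
  rw [List.any_eq_true]
  constructor
  · rintro ⟨i, hmem, hbeq⟩
    rw [PySem.List.mem_pyRange_one] at hmem
    obtain ⟨h0, hlt⟩ := hmem
    rw [beq_iff_eq, PySem.List.slice_toNat _ h0 (by omega)] at hbeq
    have harith : ((i + (y.length : Int)).toNat - i.toNat) = y.length := by omega
    rw [harith] at hbeq
    exact ⟨i.toNat, by omega, hbeq⟩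
  · rintro ⟨k, hk, hy⟩
    refine ⟨(k : Int), by rw [PySem.List.mem_pyRange_one]; omega, ?_⟩
    have h1 : (((k : Int)) + (y.length : Int)).toNat - ((k : Int)).toNat = y.length := by omega
    have h2 : ((k : Int)).toNat = k := by omega
    rw [beq_iff_eq, PySem.List.slice_toNat _ (by positivity) (by positivity), h1, h2]
    exact hy

theorem mem_double (p : List Int) (l : List Int) (seen : PySem.Set (List Int)) (y : List Int) :
    y ∈ l.foldl
      (fun s i =>
        (PySem.List.pyRange (i + 1) ((p.length : Int) + 1) 1).foldl
          (fun s j => PySem.Set.add s (PySem.List.slice p (some i) (some j))) s)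
      seen ↔
    y ∈ seen ∨ ∃ i ∈ l, ∃ j : Int, i + 1 ≤ j ∧ j < (p.length : Int) + 1 ∧
      y = PySem.List.slice p (some i) (some j) := by
  induction l generalizing seen with
  | nil => simp
  | cons i t ih =>
    rw [List.foldl_cons, ih]
    rw [PySem.Set.mem_foldl_add]
    constructor
    · rintro (⟨h | ⟨j, hj, hy⟩⟩ | ⟨i', hi', j, h1, h2, hy⟩)
      · exact Or.inl h
      · rw [PySem.List.mem_pyRange_one] at hj
        exact Or.inr ⟨i, List.mem_cons_self .., j, hj.1, hj.2, hy⟩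
      · exact Or.inr ⟨i', List.mem_cons_of_mem _ hi', j, h1, h2, hy⟩
    · rintro (h | ⟨i', hi', j, h1, h2, hy⟩)
      · exact Or.inl (Or.inl h)
      · rcases List.mem_cons.mp hi' with rfl | hmem
        · exact Or.inl (Or.inr ⟨j, PySem.List.mem_pyRange_one.mpr ⟨h1, h2⟩, hy⟩)
        · exact Or.inr ⟨i', hmem, j, h1, h2, hy⟩

theorem keys_insert_my {κ ν : Type} [BEq κ] [LawfulBEq κ] (d : PySem.Dict κ ν) (k : κ) (v : ν) :
    (d.insert k v).keys = if d.contains k then d.keys else d.keys ++ [k] := by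
  simp only [PySem.Dict.insert, PySem.Dict.keys]
  split
  · rw [List.map_map]
    refine List.map_congr_left ?_
    intro q _
    simp only [Function.comp]
    split
    · next h => exact (eq_of_beq h).symm
    · rfl
  · simp

theorem contains_iff_mem_keys {κ ν : Type} [BEq κ] [LawfulBEq κ] (d : PySem.Dict κ ν) (k : κ) :
    d.contains k = true ↔ k ∈ d.keys := by
  simp only [PySem.Dict.contains, PySem.Dict.keys, List.any_eq_true, List.mem_map, beq_iff_eq]

theorem slice_rep_iff (p y : List Int) :
    ((∃ i : Int, (0 ≤ i ∧ i < (p.length : Int)) ∧ ∃ j : Int, i + 1 ≤ j ∧ j < (p.length : Int) + 1 ∧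
        y = PySem.List.slice p (some i) (some j)) ∨ y = []) ↔ occursIn p y := by
  unfold occursIn
  constructor
  · rintro (⟨i, ⟨h0, hin⟩, j, h1, h2, hy⟩ | rfl)
    · rw [PySem.List.slice_toNat _ h0 (by omega)] at hy
      have hlen : y.length = j.toNat - i.toNat := by
        rw [hy, List.length_take, List.length_drop]; omega
      refine ⟨i.toNat, by omega, ?_⟩
      rw [hlen]
      exact hy
    · exact ⟨0, by simp, by simp⟩
  · rintro ⟨k, hk, hy⟩
    by_cases hnil : y = []
    · exact Or.inr hnil
    · have hpos : 0 < y.length := List.length_pos_of_ne_nil hnil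
      left
      refine ⟨(k : Int), ⟨by positivity, by omega⟩, (k : Int) + (y.length : Int), by omega, by omega, ?_⟩
      have h1 : (((k : Int)) + (y.length : Int)).toNat - ((k : Int)).toNat = y.length := by omega
      have h2 : ((k : Int)).toNat = k := by omega
      rw [PySem.List.slice_toNat _ (by positivity) (by positivity), h1, h2]
      exact hy

theorem main_loop (fb : PySem.Dict (List Int) Int) (l : List (List Int))
    (d : PySem.Dict (List Int) Int) (seen : PySem.Set (List Int))
    (hinv : ∀ y, y ∈ seen ↔ ∃ f ∈ d.keys, occursIn f y) :
    l.foldl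
      (fun (filtered : PySem.Dict (List Int) Int) p =>
        if filtered.keys.any (fun f => is_sublist f p || is_sublist f p.reverse) then
          filtered
        else
          filtered.insert p (fb.getD p 0)) d =
    (l.foldl
      (fun (st : PySem.Dict (List Int) Int × PySem.Set (List Int)) p =>
        if !(PySem.Set.contains st.2 p) && !(PySem.Set.contains st.2 p.reverse) then
          ((st.1.insert p (fb.getD p 0)),
           PySem.Set.add
             ((PySem.List.pyRange 0 (p.length : Int) 1).foldl
               (fun s i =>
                 (PySem.List.pyRange (i + 1) ((p.length : Int) + 1) 1).foldl
                   (fun s j => PySem.Set.add s (PySem.List.slice p (some i) (some j))) s)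
               st.2)
             [])
        else st) (d, seen)).1 := by
  induction l generalizing d seen with
  | nil => rfl
  | cons p t ih =>
    simp only [List.foldl_cons]
    have hguard : (d.keys.any (fun f => is_sublist f p || is_sublist f p.reverse)) =
        (PySem.Set.contains seen p || PySem.Set.contains seen p.reverse) := by
      rw [Bool.eq_iff_iff]
      simp only [List.any_eq_true, Bool.or_eq_true, is_sublist_iff, PySem.Set.contains_iff]
      rw [hinv p, hinv p.reverse]
      constructor
      · rintro ⟨f, hf, h | h⟩
        · exact Or.inl ⟨f, hf, h⟩
        · exact Or.inr ⟨f, hf, h⟩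
      · rintro (⟨f, hf, h⟩ | ⟨f, hf, h⟩)
        · exact ⟨f, hf, Or.inl h⟩
        · exact ⟨f, hf, Or.inr h⟩
    cases hc : (PySem.Set.contains seen p || PySem.Set.contains seen p.reverse) with
    | true =>
      rw [hguard, hc]
      rcases Bool.or_eq_true_iff.mp hc with h1 | h1 <;>
        simp only [if_true, h1, Bool.not_true, Bool.false_and, Bool.and_false] <;>
      exact ih d seen hinv
    | false =>
      obtain ⟨h1, h2⟩ := Bool.or_eq_false_iff.mp hc
      rw [hguard, hc]
      simp only [h1, h2, Bool.not_false, Bool.true_and, Bool.false_eq_true, reduceIte]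
      refine ih _ _ ?_
      intro y
      rw [PySem.Set.mem_add, mem_double]
      have hcomb : ((y ∈ seen ∨ ∃ i ∈ PySem.List.pyRange 0 ((p.length : Int)) 1, ∃ j : Int,
          i + 1 ≤ j ∧ j < (p.length : Int) + 1 ∧ y = PySem.List.slice p (some i) (some j)) ∨ y = [])
          ↔ (y ∈ seen ∨ occursIn p y) := by
        rw [or_assoc]
        refine or_congr Iff.rfl ?_
        rw [← slice_rep_iff p y]
        simp only [PySem.List.mem_pyRange_one]
      rw [hcomb, keys_insert_my]
      by_cases hcont : d.contains p = true
      · simp only [hcont, if_true]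
        constructor
        · rintro (hy | hy)
          · exact (hinv y).mp hy
          · exact ⟨p, (contains_iff_mem_keys _ _).mp hcont, hy⟩
        · rintro ⟨f, hf, h⟩
          exact Or.inl ((hinv y).mpr ⟨f, hf, h⟩)
      · simp only [hcont, Bool.false_eq_true, reduceIte, List.mem_append, List.mem_singleton]
        constructor
        · rintro (hy | hy)
          · obtain ⟨f, hf, h⟩ := (hinv y).mp hy
            exact ⟨f, Or.inl hf, h⟩
          · exact ⟨p, Or.inr rfl, hy⟩
        · rintro ⟨f, hf | rfl, h⟩
          · exact Or.inl ((hinv y).mpr ⟨f, hf, h⟩)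
          · exact Or.inr h

-- ===== VERDICT (by name: the statement is the Claim_ definition above) =====
theorem filter_blocks_spec : Claim_equal_filter_blocks := by
  intro full_blocks _
  unfold Spec_filter_blocks filter_blocks filter_blocks_alt
  refine congrArg PySem.Dict.items ?_
  exact main_loop _ _ _ _ (by simp [PySem.Dict.empty, PySem.Dict.keys, PySem.Set.empty])
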